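-- pv_equiv track=rewrite | github.com/vekerdyb/lunch-server | lunch/meals/management/tests.py | generate_meal_string
-- ===== SOURCE A (Python) =====
-- def generate_meal_string(data, number_of_days):
--     """
--     Data format:
--     A list of lists.
--     Sublists contain integers for the day of the month, when the meal option is payed for.
--     E.g:
--     [[1, 2, 28], [3, 5], []] means:
--     - meal option 1 on 1st, 2nd, and 28th,
--     - meal option 2 on 3rd, 5th
--     - no days for meal option 3
--
--     """
--     meal_string = []
--     days = range(1, number_of_days + 1)
--     for meal_option in data:
--         for day in days:
--             if len(meal_option) > 0 and meal_option[0] == day: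
--                 meal_string.append('1')
--                 meal_option = meal_option[1:]
--             else:
--                 meal_string.append('0')
--     return '_'.join(meal_string) + '_'
-- ===== SOURCE B (Python) =====
-- def generate_meal_string(data, number_of_days):
--     bits = []
--     for meal_option in data:
--         day = 1
--         for v in meal_option:
--             if day <= v <= number_of_days:
--                 bits.extend(['0'] * (v - day))
--                 bits.append('1')
--                 day = v + 1
--             else:
--                 break
--         bits.extend(['0'] * (number_of_days - day + 1))
--     return '_'.join(bits) + '_'
-- ===== Notes on version B (the rewrite author's own statement) =====
-- stated objective: faster
-- what changed: B walks each option's sparse day list and emits gap zeros in bulk arithmetically (stopping at the first unserviceable entry), instead of A's dense per-day scan with repeated list slicing of the consumption pointer.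
import Mathlib
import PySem

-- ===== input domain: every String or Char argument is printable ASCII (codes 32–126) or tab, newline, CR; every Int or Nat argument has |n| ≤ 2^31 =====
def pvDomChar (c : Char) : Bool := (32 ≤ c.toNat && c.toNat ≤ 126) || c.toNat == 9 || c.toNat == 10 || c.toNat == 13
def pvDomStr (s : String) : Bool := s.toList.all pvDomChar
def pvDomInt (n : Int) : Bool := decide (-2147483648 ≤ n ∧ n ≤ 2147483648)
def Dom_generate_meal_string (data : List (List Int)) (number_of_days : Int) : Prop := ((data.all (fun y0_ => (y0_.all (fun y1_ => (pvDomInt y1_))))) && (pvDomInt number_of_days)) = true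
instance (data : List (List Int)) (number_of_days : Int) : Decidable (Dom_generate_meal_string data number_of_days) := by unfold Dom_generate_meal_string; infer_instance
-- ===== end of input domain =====

-- B replaces A's dense per-day scan with an arithmetic walk over each option's sparse day list; equal return value (no observable mutation in either).

-- ===== PORT A =====
-- inner loop body: one day of A's scan over the state (accumulated bits, remaining meal_option)
def pvStepA (st : List String × List Int) (day : Int) : List String × List Int :=
  match st.2 with
  | [] => (st.1 ++ ["0"], [])
  | v :: rest =>
      if v = day then (st.1 ++ ["1"], rest)
      else (st.1 ++ ["0"], v :: rest)

def generate_meal_string (data : List (List Int)) (number_of_days : Int) : String :=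
  let days := PySem.List.pyRange 1 (number_of_days + 1) 1
  let meal_string := data.foldl (fun acc meal_option => ((days.foldl pvStepA (acc, meal_option)).1)) []
  PySem.Str.join "_" meal_string ++ "_"

-- ===== PORT B =====
-- bits emitted for one meal_option, walking its elements with the current day counter
def pvOptB (number_of_days : Int) : List Int → Int → List String
  | [], day => List.replicate (number_of_days - day + 1).toNat "0"
  | v :: rest, day =>
      if day ≤ v ∧ v ≤ number_of_days then
        List.replicate (v - day).toNat "0" ++ ["1"] ++ pvOptB number_of_days rest (v + 1)
      else
        List.replicate (number_of_days - day + 1).toNat "0"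

def generate_meal_string_alt (data : List (List Int)) (number_of_days : Int) : String :=
  let bits := data.foldl (fun acc meal_option => acc ++ pvOptB number_of_days meal_option 1) []
  PySem.Str.join "_" bits ++ "_"

-- ===== PRECONDITION & SPEC =====
def Spec_generate_meal_string (data : List (List Int)) (number_of_days : Int) (out : String) : Prop := out = generate_meal_string_alt data number_of_days
instance (data : List (List Int)) (number_of_days : Int) (out : String) : Decidable (Spec_generate_meal_string data number_of_days out) := by unfold Spec_generate_meal_string; infer_instance

-- ===== CLAIM (what is proved, stated in full; the proofs are below) =====
def Claim_equal_generate_meal_string : Prop := ∀ (data : List (List Int)) (number_of_days : Int), Dom_generate_meal_string data number_of_days → Spec_generate_meal_string data number_of_days (generate_meal_string data number_of_days)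

-- ===== LEMMAS AND PROOFS =====

lemma replicate_zero_succ {n d : Int} (h : d ≤ n) (s : String) :
    s :: List.replicate (n - (d + 1) + 1).toNat s = List.replicate (n - d + 1).toNat s := by
  have : (n - d + 1).toNat = (n - (d + 1) + 1).toNat + 1 := by omega
  rw [this, List.replicate_succ]

-- core loop invariant: A's scan of days d..n from state (acc, opt) yields acc ++ B's bits for opt at day d
lemma loop_eq (n : Int) : ∀ k (d : Int), (n + 1 - d).toNat = k →
    ∀ (opt : List Int) (acc : List String),
    ((PySem.List.pyRange d (n + 1) 1).foldl pvStepA (acc, opt)).1 = acc ++ pvOptB n opt d := by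
  intro k
  induction k with
  | zero =>
      intro d hd opt acc
      have hdn : n + 1 ≤ d := by omega
      rw [PySem.List.pyRange_one_eq_nil hdn]
      simp only [List.foldl_nil]
      cases opt with
      | nil =>
          have : (n - d + 1).toNat = 0 := by omega
          simp [pvOptB, this]
      | cons v rest =>
          have h1 : ¬ (d ≤ v ∧ v ≤ n) := by omega
          have h2 : (n - d + 1).toNat = 0 := by omega
          simp [pvOptB, h1, h2]
  | succ k ih =>
      intro d hd opt acc
      have hdn : d < n + 1 := by omega
      rw [PySem.List.pyRange_one_cons hdn]
      simp only [List.foldl_cons]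
      cases opt with
      | nil =>
          have := ih (d + 1) (by omega) [] (acc ++ ["0"])
          simp only [pvStepA] at *
          rw [this]
          simp [pvOptB, List.append_assoc, replicate_zero_succ (by omega : d ≤ n) "0"]
      | cons v rest =>
          by_cases hv : v = d
          · subst hv
            have hstep : pvStepA (acc, v :: rest) v = (acc ++ ["1"], rest) := by
              simp [pvStepA]
            rw [hstep, ih (v + 1) (by omega) rest (acc ++ ["1"])]
            have hc : v ≤ v ∧ v ≤ n := ⟨le_refl _, by omega⟩
            have hz : (v - v).toNat = 0 := by omega
            simp [pvOptB, hc, List.append_assoc]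
          · have hstep : pvStepA (acc, v :: rest) d = (acc ++ ["0"], v :: rest) := by
              simp [pvStepA, hv]
            rw [hstep, ih (d + 1) (by omega) (v :: rest) (acc ++ ["0"])]
            by_cases hc : d ≤ v ∧ v ≤ n
            · have hc' : d + 1 ≤ v ∧ v ≤ n := ⟨by omega, hc.2⟩
              have : "0" :: List.replicate (v - (d + 1)).toNat "0" = List.replicate (v - d).toNat "0" := by
                have : (v - d).toNat = (v - (d + 1)).toNat + 1 := by omega
                rw [this, List.replicate_succ]
              simp only [pvOptB, if_pos hc, if_pos hc', List.append_assoc]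
              rw [← this]
              simp
            · have hc' : ¬ (d + 1 ≤ v ∧ v ≤ n) := by
                intro h; exact hc ⟨by omega, h.2⟩
              simp only [pvOptB, if_neg hc, if_neg hc', List.append_assoc]
              rw [← replicate_zero_succ (by omega : d ≤ n) "0"]
              simp

lemma fold_eq (data : List (List Int)) (n : Int) :
    data.foldl (fun acc meal_option => ((PySem.List.pyRange 1 (n + 1) 1).foldl pvStepA (acc, meal_option)).1) []
      = data.foldl (fun acc meal_option => acc ++ pvOptB n meal_option 1) [] := by
  have hf : (fun (acc : List String) meal_option => ((PySem.List.pyRange 1 (n + 1) 1).foldl pvStepA (acc, meal_option)).1)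
      = fun acc meal_option => acc ++ pvOptB n meal_option 1 := by
    funext acc opt
    exact loop_eq n (n + 1 - 1).toNat 1 rfl opt acc
  rw [hf]

-- ===== VERDICT (by name: the statement is the Claim_ definition above) =====
theorem generate_meal_string_spec : Claim_equal_generate_meal_string := by
  intro data n _
  show _ = _
  simp only [generate_meal_string, generate_meal_string_alt, fold_eq]
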